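-- pv_equiv track=rewrite | github.com/Syntharra/syntharra-automations | archived/testing-infra/agentic-test-fix.py | filter_scenarios
-- ===== SOURCE A (Python) =====
-- def filter_scenarios(all_scenarios, agent_type, group_filter=None, scenario_ids=None):
--     """Filter scenarios. Standard agent skips premiumOnly scenarios."""
--     filtered = all_scenarios
--
--     # Standard: skip premium-only scenarios
--     if agent_type == "standard":
--         filtered = [s for s in filtered if not s.get("premiumOnly") and not s.get("premium_only")]
--
--     if scenario_ids:
--         filtered = [s for s in filtered if s["id"] in scenario_ids]
--     elif group_filter:
--         filtered = [s for s in filtered if s.get("group") == group_filter]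
--
--     return filtered
-- ===== SOURCE B (Python) =====
-- def filter_scenarios(all_scenarios, agent_type, group_filter=None, scenario_ids=None):
--     """Single fused pass: precomputed flags, one loop with continue-style predicates."""
--     use_ids = bool(scenario_ids)
--     use_group = (not use_ids) and bool(group_filter)
--     skip_premium = (agent_type == "standard")
--     out = []
--     for s in all_scenarios:
--         if skip_premium and (s.get("premiumOnly") or s.get("premium_only")):
--             continue
--         if use_ids and s["id"] not in scenario_ids:
--             continue
--         if use_group and s.get("group") != group_filter:
--             continue
--         out.append(s)
--     return out
-- ===== Notes on version B (the rewrite author's own statement) =====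
-- stated objective: alternative
-- what changed: Replaces A's two sequential list-comprehension passes (premium filter, then id/group filter) with precomputed use_ids/use_group/skip_premium flags and one fused loop over all_scenarios that appends a scenario only if it survives every active predicate.
import Mathlib
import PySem

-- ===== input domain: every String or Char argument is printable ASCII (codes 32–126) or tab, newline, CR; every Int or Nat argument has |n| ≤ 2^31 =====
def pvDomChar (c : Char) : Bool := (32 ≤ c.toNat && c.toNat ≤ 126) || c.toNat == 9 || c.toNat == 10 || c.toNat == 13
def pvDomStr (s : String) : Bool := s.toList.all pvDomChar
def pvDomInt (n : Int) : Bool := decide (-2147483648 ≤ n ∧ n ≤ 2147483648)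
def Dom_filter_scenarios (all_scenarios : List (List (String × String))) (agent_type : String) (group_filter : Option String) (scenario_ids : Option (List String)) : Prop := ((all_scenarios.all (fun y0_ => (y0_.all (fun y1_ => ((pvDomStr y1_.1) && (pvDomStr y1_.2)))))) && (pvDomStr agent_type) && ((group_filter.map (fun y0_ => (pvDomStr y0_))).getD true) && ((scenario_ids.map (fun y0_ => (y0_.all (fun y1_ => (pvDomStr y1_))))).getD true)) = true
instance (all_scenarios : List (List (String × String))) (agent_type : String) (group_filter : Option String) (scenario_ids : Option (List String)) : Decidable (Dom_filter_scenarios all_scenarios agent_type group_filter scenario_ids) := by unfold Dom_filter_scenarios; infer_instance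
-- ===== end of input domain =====

-- B fuses A's two sequential filtering passes into one loop with precomputed flags; return value only (neither version mutates its arguments).

-- shared dict primitives: first-match association-list lookup (= Python dict get) and Python truthiness of s.get(k)
def pvGet? : List (String × String) → String → Option String
  | [], _ => none
  | (k, v) :: rest, key => if k == key then some v else pvGet? rest key

def pvTruthy (s : List (String × String)) (k : String) : Bool :=
  match pvGet? s k with
  | some v => v ≠ ""
  | none => false

-- ===== PORT A =====
def filter_scenarios (all_scenarios : List (List (String × String))) (agent_type : String) (group_filter : Option String) (scenario_ids : Option (List String)) : List (List (String × String)) :=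
  let filtered := all_scenarios
  let filtered :=
    if agent_type == "standard" then
      filtered.filter (fun s => !pvTruthy s "premiumOnly" && !pvTruthy s "premium_only")
    else filtered
  if (match scenario_ids with | some ids => !ids.isEmpty | none => false) then
    -- s["id"]: Python raises KeyError when the key is missing; Pre_ excludes those inputs, the port returns false there
    filtered.filter (fun s =>
      match pvGet? s "id" with
      | some v => (scenario_ids.getD []).contains v
      | none => false)
  else if (match group_filter with | some g => g != "" | none => false) then
    filtered.filter (fun s => pvGet? s "group" == some (group_filter.getD ""))
  else filtered

-- ===== PORT B =====
def filter_scenarios_alt (all_scenarios : List (List (String × String))) (agent_type : String) (group_filter : Option String) (scenario_ids : Option (List String)) : List (List (String × String)) :=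
  let use_ids := (match scenario_ids with | some ids => !ids.isEmpty | none => false)
  let use_group := !use_ids && (match group_filter with | some g => g != "" | none => false)
  let skip_premium := agent_type == "standard"
  all_scenarios.foldl
    (fun out s =>
      if skip_premium && (pvTruthy s "premiumOnly" || pvTruthy s "premium_only") then out
      else if use_ids && !(match pvGet? s "id" with
                           | some v => (scenario_ids.getD []).contains v
                           | none => false) then out
      else if use_group && !(pvGet? s "group" == some (group_filter.getD "")) then out
      else out ++ [s]) []

-- ===== PRECONDITION & SPEC =====
-- Pre_ excludes exactly the inputs where Python A raises KeyError: scenario_ids truthy and some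
-- scenario that survives the premium filter has no "id" key (B raises there too).
def Pre_filter_scenarios (all_scenarios : List (List (String × String))) (agent_type : String) (group_filter : Option String) (scenario_ids : Option (List String)) : Prop :=
  (match scenario_ids with | some ids => !ids.isEmpty | none => false) = true →
    ∀ s ∈ all_scenarios,
      ((agent_type == "standard" && (pvTruthy s "premiumOnly" || pvTruthy s "premium_only"))
        || s.any (fun p => p.1 == "id")) = true
instance (all_scenarios : List (List (String × String))) (agent_type : String) (group_filter : Option String) (scenario_ids : Option (List String)) : Decidable (Pre_filter_scenarios all_scenarios agent_type group_filter scenario_ids) := by unfold Pre_filter_scenarios; infer_instance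

def pvWitness_filter_scenarios : (List (List (String × String))) × String × Option String × Option (List String) :=
  ([[("id", "1"), ("group", "g")], [("premiumOnly", "x")]], "standard", some "g", none)

def Spec_filter_scenarios (all_scenarios : List (List (String × String))) (agent_type : String) (group_filter : Option String) (scenario_ids : Option (List String)) (out : List (List (String × String))) : Prop := out = filter_scenarios_alt all_scenarios agent_type group_filter scenario_ids
instance (all_scenarios : List (List (String × String))) (agent_type : String) (group_filter : Option String) (scenario_ids : Option (List String)) (out : List (List (String × String))) : Decidable (Spec_filter_scenarios all_scenarios agent_type group_filter scenario_ids out) := by unfold Spec_filter_scenarios; infer_instance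

-- ===== CLAIM (what is proved, stated in full; the proofs are below) =====
def Claim_equal_filter_scenarios : Prop := ∀ (all_scenarios : List (List (String × String))) (agent_type : String) (group_filter : Option String) (scenario_ids : Option (List String)), Dom_filter_scenarios all_scenarios agent_type group_filter scenario_ids → Pre_filter_scenarios all_scenarios agent_type group_filter scenario_ids → Spec_filter_scenarios all_scenarios agent_type group_filter scenario_ids (filter_scenarios all_scenarios agent_type group_filter scenario_ids)

-- ===== LEMMAS AND PROOFS =====

-- B's loop body, rewritten as a single boolean test
theorem alt_foldl_eq_filter (xs : List (List (String × String)))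
    (c1 c2 c3 : List (String × String) → Bool) :
    xs.foldl (fun out s => if c1 s then out else if c2 s then out else if c3 s then out
              else out ++ [s]) [] =
    xs.filter (fun s => !c1 s && !c2 s && !c3 s) := by
  have hbody : (fun (out : List (List (String × String))) s =>
      if c1 s then out else if c2 s then out else if c3 s then out else out ++ [s]) =
      (fun out s => if (!c1 s && !c2 s && !c3 s) then out ++ [s] else out) := by
    funext out s
    cases h1 : c1 s <;> cases h2 : c2 s <;> cases h3 : c3 s <;> simp [h1, h2, h3]
  rw [hbody, PySem.List.foldl_append_if_eq_filter]
  simp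

theorem filter_scenarios_spec_aux (all_scenarios : List (List (String × String)))
    (agent_type : String) (group_filter : Option String) (scenario_ids : Option (List String))
    (hpre : Pre_filter_scenarios all_scenarios agent_type group_filter scenario_ids) :
    filter_scenarios all_scenarios agent_type group_filter scenario_ids =
      filter_scenarios_alt all_scenarios agent_type group_filter scenario_ids := by
  clear hpre
  unfold filter_scenarios filter_scenarios_alt
  rw [alt_foldl_eq_filter]
  cases hstd : (agent_type == "standard") <;>
  cases hids : (match scenario_ids with | some ids => !ids.isEmpty | none => false) <;>
  cases hgrp : (match group_filter with | some g => g != "" | none => false) <;>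
  simp only [hstd, hids, hgrp, Bool.false_and, Bool.true_and, Bool.not_false, Bool.not_true,
    Bool.and_true, Bool.and_false, Bool.not_not, if_true, if_false, Bool.false_or,
    List.filter_filter, cond_true, cond_false, Bool.false_eq_true, ite_true, ite_false,
    reduceIte] <;>
  first
  | rfl
  | (exact (List.filter_true _).symm)
  | (try rw [List.filter_filter]
     apply List.filter_congr
     intro s hs
     cases hp1 : pvTruthy s "premiumOnly" <;> cases hp2 : pvTruthy s "premium_only" <;>
       simp [hp1, hp2])

-- ===== VERDICT (by name: the statement is the Claim_ definition above) =====
theorem filter_scenarios_spec : Claim_equal_filter_scenarios := by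
  intro xs at_ gf ids _ hpre
  exact filter_scenarios_spec_aux xs at_ gf ids hpre
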